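-- pv_equiv track=rewrite | github.com/Sabertooth456/UIUC-Code | CS 440/Machine Problem 0/naive_bayes.py | process_all
-- ===== SOURCE A (Python) =====
-- def process_data(data):
--     stats = dict()
--     word_count = 0
--     for word in data:
--         word_count += 1
--         l_word = word.lower()
--         if (not (l_word in stats)):
--             stats[l_word] = 0
--         stats[l_word] += 1
--     return stats, word_count
--
-- def process_all(train_labels, train_data):
--     all_stats = {}
--     total_words = [0, 0]
--     for i in range(len(train_labels)):
--         stats, word_count = process_data(train_data[i])
--         label = train_labels[i]
--         total_words[label] += word_count
--         for word in stats:
--             l_word = word.lower()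
--             if (not (l_word in all_stats)):
--                 all_stats[l_word] = [0, 0]
--             all_stats[l_word][label] += stats[l_word]
--     return all_stats, total_words
-- ===== SOURCE B (Python) =====
-- def process_all(train_labels, train_data):
--     all_stats = {}
--     total_words = [0, 0]
--     for label, doc in zip(train_labels, train_data):
--         for word in doc:
--             l_word = word.lower()
--             if l_word not in all_stats:
--                 all_stats[l_word] = [0, 0]
--             all_stats[l_word][label] += 1
--             total_words[label] += 1
--     return all_stats, total_words
-- ===== Notes on version B (the rewrite author's own statement) =====
-- stated objective: simpler
-- what changed: B drops A's two-phase structure (build a per-document frequency dict in process_data, then merge it key-by-key into all_stats) and instead accumulates every word directly into all_stats/total_words in a single pass over zip(train_labels, train_data).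
import Mathlib
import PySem

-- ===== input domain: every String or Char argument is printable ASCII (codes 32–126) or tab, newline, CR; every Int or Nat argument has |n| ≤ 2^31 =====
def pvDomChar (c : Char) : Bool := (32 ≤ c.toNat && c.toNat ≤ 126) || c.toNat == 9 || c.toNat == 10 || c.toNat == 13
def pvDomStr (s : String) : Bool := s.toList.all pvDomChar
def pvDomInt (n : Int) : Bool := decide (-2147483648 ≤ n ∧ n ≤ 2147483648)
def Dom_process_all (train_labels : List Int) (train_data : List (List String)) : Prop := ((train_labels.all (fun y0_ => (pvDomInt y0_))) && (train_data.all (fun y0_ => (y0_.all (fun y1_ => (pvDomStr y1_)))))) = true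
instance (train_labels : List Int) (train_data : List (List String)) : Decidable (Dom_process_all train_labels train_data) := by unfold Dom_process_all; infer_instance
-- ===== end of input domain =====

-- B replaces A's per-document Counter-then-merge two-phase structure by one direct
-- accumulation pass over zip(train_labels, train_data) (objective: simpler).


-- `v[label] += c` on a 2-element Python list: exact for v of length 2 and
-- label ∈ {-2,-1,0,1} (a negative index counts from the end); Pre_ guarantees this.
def pvIncAt (v : List Int) (label c : Int) : List Int :=
  match v with
  | [a, b] => if label = 0 ∨ label = -2 then [a + c, b] else [a, c + b]
  | w => w

-- ===== PORT A =====
def process_data (data : List String) : PySem.Dict String Int × Int :=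
  data.foldl (fun st word =>
    ((if st.1.contains (PySem.Str.lower word) then st.1
      else st.1.insert (PySem.Str.lower word) 0).insert (PySem.Str.lower word)
        ((if st.1.contains (PySem.Str.lower word) then st.1
          else st.1.insert (PySem.Str.lower word) 0).getD (PySem.Str.lower word) 0 + 1),
     st.2 + 1))
    (PySem.Dict.empty, 0)

def process_all (train_labels : List Int) (train_data : List (List String)) : (List (String × List Int)) × List Int :=
  let st := (PySem.List.pyRange 0 (train_labels.length : Int) 1).foldl
    (fun (st : PySem.Dict String (List Int) × List Int) i =>
      let sd := process_data (PySem.List.pyGetD train_data i [])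
      let label := PySem.List.pyGetD train_labels i 0
      (sd.1.keys.foldl (fun allst word =>
         (if allst.contains (PySem.Str.lower word) then allst
          else allst.insert (PySem.Str.lower word) [0, 0]).insert (PySem.Str.lower word)
           (pvIncAt ((if allst.contains (PySem.Str.lower word) then allst
                      else allst.insert (PySem.Str.lower word) [0, 0]).getD (PySem.Str.lower word) [0, 0])
             label (sd.1.getD (PySem.Str.lower word) 0))) st.1,
       pvIncAt st.2 label sd.2))
    (PySem.Dict.empty, [0, 0])
  (st.1.items, st.2)

-- ===== PORT B =====
def process_all_alt (train_labels : List Int) (train_data : List (List String)) : (List (String × List Int)) × List Int :=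
  let st := (train_labels.zip train_data).foldl
    (fun (st : PySem.Dict String (List Int) × List Int) p =>
      p.2.foldl (fun st word =>
        ((if st.1.contains (PySem.Str.lower word) then st.1
          else st.1.insert (PySem.Str.lower word) [0, 0]).insert (PySem.Str.lower word)
           (pvIncAt ((if st.1.contains (PySem.Str.lower word) then st.1
                      else st.1.insert (PySem.Str.lower word) [0, 0]).getD (PySem.Str.lower word) [0, 0])
             p.1 1),
         pvIncAt st.2 p.1 1)) st)
    (PySem.Dict.empty, [0, 0])
  (st.1.items, st.2)

-- ===== PRECONDITION & SPEC =====
-- Pre_ excludes exactly the inputs where the Python A raises: an IndexError from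
-- train_data[i] when train_data is shorter than train_labels, or an IndexError from
-- total_words[label] / all_stats[w][label] when some label lies outside {-2,-1,0,1}
-- (the indices a 2-element Python list accepts).
def Pre_process_all (train_labels : List Int) (train_data : List (List String)) : Prop :=
  train_labels.length ≤ train_data.length ∧
  ∀ l ∈ train_labels, l = 0 ∨ l = 1 ∨ l = -1 ∨ l = -2
instance (train_labels : List Int) (train_data : List (List String)) : Decidable (Pre_process_all train_labels train_data) := by unfold Pre_process_all; infer_instance

def pvWitness_process_all : List Int × List (List String) := ([0, 1], [["a"], ["B", "b"]])

def Spec_process_all (train_labels : List Int) (train_data : List (List String)) (out : (List (String × List Int)) × List Int) : Prop := out = process_all_alt train_labels train_data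
instance (train_labels : List Int) (train_data : List (List String)) (out : (List (String × List Int)) × List Int) : Decidable (Spec_process_all train_labels train_data out) := by unfold Spec_process_all; infer_instance

-- ===== CLAIM (what is proved, stated in full; the proofs are below) =====
def Claim_equal_process_all : Prop := ∀ (train_labels : List Int) (train_data : List (List String)), Dom_process_all train_labels train_data → Pre_process_all train_labels train_data → Spec_process_all train_labels train_data (process_all train_labels train_data)

-- ===== LEMMAS AND PROOFS =====

theorem lowerChar_idem (c : Char) : PySem.Chars.lowerChar (PySem.Chars.lowerChar c) = PySem.Chars.lowerChar c := by
  by_cases h : PySem.Chars.isupper c = true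
  · have hb : 65 ≤ c.toNat ∧ c.toNat ≤ 90 := by
      simp only [PySem.Chars.isupper, Bool.and_eq_true, decide_eq_true_eq, Char.le_def] at h
      obtain ⟨h1, h2⟩ := h
      have a1 := (UInt32.le_iff_toNat_le ..).mp h1
      have a2 := (UInt32.le_iff_toNat_le ..).mp h2
      have e : c.toNat = c.val.toNat := rfl
      simp at a1 a2
      omega
    have hv : (Char.ofNat (c.toNat + 32)).toNat = c.toNat + 32 := by
      rw [Char.toNat_ofNat]
      have : (c.toNat + 32).isValidChar := Or.inl (by omega)
      simp [this]
    have h2 : PySem.Chars.isupper (Char.ofNat (c.toNat + 32)) = false := by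
      simp only [PySem.Chars.isupper, Bool.and_eq_false_iff, decide_eq_false_iff_not, Char.le_def]
      right
      intro hle
      have a2 := (UInt32.le_iff_toNat_le ..).mp hle
      have e : (Char.ofNat (c.toNat + 32)).toNat = (Char.ofNat (c.toNat + 32)).val.toNat := rfl
      simp at a2
      omega
    simp [PySem.Chars.lowerChar, h, h2]
  · simp only [Bool.not_eq_true] at h
    simp [PySem.Chars.lowerChar, h]

theorem strLower_idem (s : String) : PySem.Str.lower (PySem.Str.lower s) = PySem.Str.lower s := by
  simp [PySem.Str.lower, PySem.Chars.lower, Function.comp_def, lowerChar_idem]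

theorem pvIncAt_zero (v : List Int) (l : Int) : pvIncAt v l 0 = v := by
  unfold pvIncAt
  split
  · split <;> simp
  · rfl

theorem pvIncAt_add (v : List Int) (l a b : Int) :
    pvIncAt (pvIncAt v l a) l b = pvIncAt v l (a + b) := by
  rcases v with _ | ⟨x, _ | ⟨y, _ | ⟨z, t⟩⟩⟩ <;> simp only [pvIncAt] <;> split_ifs <;>
    simp [add_comm, add_left_comm]

-- collapse of Python's "if k not in d: d[k] = dflt; d[k] = f(d[k])" into one insert
theorem pvSetdefault_collapse {ν : Type} (d : PySem.Dict String ν) (k : String) (dflt : ν) (f : ν → ν) :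
    (if d.contains k then d else d.insert k dflt).insert k
      (f ((if d.contains k then d else d.insert k dflt).getD k dflt))
    = d.insert k (f (d.getD k dflt)) := by
  by_cases h : d.contains k = true
  · simp [h]
  · simp only [Bool.not_eq_true] at h
    simp [h, PySem.Dict.getD_insert_self, PySem.Dict.insert_insert_self,
      PySem.Dict.getD_of_not_contains _ _ h]

theorem getD_fold_insert_notmem {ν : Type} (f : PySem.Dict String ν → String → ν) (dflt : ν) :
    ∀ (ks : List String) (d : PySem.Dict String ν) (v : String), v ∉ ks →
      (ks.foldl (fun d k => d.insert k (f d k)) d).getD v dflt = d.getD v dflt := by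
  intro ks
  induction ks with
  | nil => intro d v _; rfl
  | cons k t ih =>
    intro d v hv
    simp only [List.mem_cons, not_or] at hv
    simp only [List.foldl_cons]
    rw [ih _ _ hv.2, PySem.Dict.getD_insert_of_ne _ _ _ hv.1]

theorem getD_foldA (label : Int) (c : String → Int) :
    ∀ (ks : List String) (d : PySem.Dict String (List Int)) (v : String), ks.Nodup →
      (ks.foldl (fun d k => d.insert k (pvIncAt (d.getD k [0, 0]) label (c k))) d).getD v [0, 0]
      = if v ∈ ks then pvIncAt (d.getD v [0, 0]) label (c v) else d.getD v [0, 0] := by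
  intro ks
  induction ks with
  | nil => intro d v _; simp
  | cons k t ih =>
    intro d v hnd
    simp only [List.nodup_cons] at hnd
    simp only [List.foldl_cons]
    by_cases hv : v = k
    · subst hv
      rw [getD_fold_insert_notmem _ _ _ _ _ hnd.1, PySem.Dict.getD_insert_self]
      simp
    · rw [ih _ _ hnd.2, PySem.Dict.getD_insert_of_ne _ _ _ hv]
      simp [hv]

theorem getD_foldB (label : Int) :
    ∀ (ws : List String) (d : PySem.Dict String (List Int)) (v : String),
      (ws.foldl (fun d k => d.insert k (pvIncAt (d.getD k [0, 0]) label 1)) d).getD v [0, 0]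
      = pvIncAt (d.getD v [0, 0]) label (ws.count v : Int) := by
  intro ws
  induction ws with
  | nil => intro d v; simp [pvIncAt_zero]
  | cons w t ih =>
    intro d v
    simp only [List.foldl_cons]
    rw [ih]
    by_cases hv : v = w
    · subst hv
      rw [PySem.Dict.getD_insert_self, pvIncAt_add]
      congr 1
      simp [List.count_cons_self]
      ring
    · rw [PySem.Dict.getD_insert_of_ne _ _ _ hv]
      simp [Ne.symm hv]

theorem mem_update_left {α : Type} [BEq α] [LawfulBEq α] (y : α) :
    ∀ (t : List α) (s : PySem.Set α), y ∈ s → y ∈ PySem.Set.update s t := by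
  intro t
  induction t with
  | nil => intro s h; exact h
  | cons a t ih =>
    intro s h
    simp only [PySem.Set.update, List.foldl_cons] at *
    exact ih _ ((PySem.Set.mem_add s a y).mpr (Or.inl h))

theorem mem_update_right {α : Type} [BEq α] [LawfulBEq α] (y : α) :
    ∀ (t : List α) (s : PySem.Set α), y ∈ t → y ∈ PySem.Set.update s t := by
  intro t
  induction t with
  | nil => intro s h; cases h
  | cons a t ih =>
    intro s h
    simp only [PySem.Set.update, List.foldl_cons]
    rcases List.mem_cons.mp h with h | h
    · exact mem_update_left y t _ ((PySem.Set.mem_add s a y).mpr (Or.inr h))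
    · exact ih _ h

theorem set_update_ofList (s : PySem.Set String) (ws : List String) :
    PySem.Set.update s (PySem.Set.ofList ws) = PySem.Set.update s ws := by
  induction ws using List.reverseRecOn with
  | nil => rfl
  | append_singleton t w ih =>
    have h1 : PySem.Set.ofList (t ++ [w]) = PySem.Set.add (PySem.Set.ofList t) w := by
      simp [PySem.Set.ofList, List.foldl_append]
    have h2 : PySem.Set.update s (t ++ [w]) = PySem.Set.add (PySem.Set.update s t) w := by
      simp [PySem.Set.update, List.foldl_append]
    rw [h1, h2]
    by_cases hw : w ∈ PySem.Set.ofList t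
    · have hadd : PySem.Set.add (PySem.Set.ofList t) w = PySem.Set.ofList t := by
        simp [PySem.Set.add, (PySem.Set.mem_ofList t w).mp hw]
      have hmem : w ∈ PySem.Set.update s t :=
        mem_update_right w t s ((PySem.Set.mem_ofList t w).mp hw)
      have hadd2 : PySem.Set.add (PySem.Set.update s t) w = PySem.Set.update s t := by
        simp [PySem.Set.add, hmem]
      rw [hadd, hadd2, ih]
    · have h3 : PySem.Set.update s (PySem.Set.ofList t ++ [w]) =
          PySem.Set.add (PySem.Set.update s (PySem.Set.ofList t)) w := by
        simp [PySem.Set.update, List.foldl_append]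
      have hadd : PySem.Set.add (PySem.Set.ofList t) w = PySem.Set.ofList t ++ [w] := by
        simp only [PySem.Set.add]
        rw [if_neg]
        simp [hw]
      rw [hadd, h3, ih]

-- A's merge of the per-document counter into the dict equals B's direct word-by-word pass
theorem doc_dict (label : Int) (ws : List String) (d : PySem.Dict String (List Int))
    (hnd : d.keys.Nodup) :
    (PySem.Set.ofList ws).foldl
      (fun d k => d.insert k (pvIncAt (d.getD k [0, 0]) label ((ws.count k : Nat) : Int))) d
    = ws.foldl (fun d k => d.insert k (pvIncAt (d.getD k [0, 0]) label 1)) d := by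
  apply PySem.Dict.ext
  have ndA := PySem.Dict.nodup_keys_foldl_insert (PySem.Set.ofList ws)
    (fun d k => pvIncAt (d.getD k [0, 0]) label ((ws.count k : Nat) : Int)) d hnd
  have ndB := PySem.Dict.nodup_keys_foldl_insert ws
    (fun d k => pvIncAt (d.getD k [0, 0]) label 1) d hnd
  rw [PySem.Dict.items_eq_map_keys _ ndA [0, 0], PySem.Dict.items_eq_map_keys _ ndB [0, 0]]
  rw [PySem.Dict.keys_foldl_insert, PySem.Dict.keys_foldl_insert, set_update_ofList]
  apply List.map_congr_left
  intro k _
  rw [getD_foldA label _ _ _ _ (PySem.Set.nodup_ofList ws), getD_foldB]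
  by_cases hk : k ∈ ws
  · simp [PySem.Set.mem_ofList, hk]
  · simp [PySem.Set.mem_ofList, hk, List.count_eq_zero_of_not_mem hk, pvIncAt_zero]

theorem process_data_eq (doc : List String) :
    process_data doc = (PySem.Dict.counter (doc.map PySem.Str.lower), (doc.length : Int)) := by
  unfold process_data
  rw [PySem.List.foldl_prod_mk
    (f := fun (d : PySem.Dict String Int) word =>
      (if d.contains (PySem.Str.lower word) then d
       else d.insert (PySem.Str.lower word) 0).insert (PySem.Str.lower word)
        ((if d.contains (PySem.Str.lower word) then d
          else d.insert (PySem.Str.lower word) 0).getD (PySem.Str.lower word) 0 + 1))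
    (g := fun (n : Int) (_ : String) => n + 1)]
  simp only [Prod.mk.injEq]
  constructor
  · rw [PySem.List.foldl_congr_mem _ _
      (fun d k => d.insert (PySem.Str.lower k) (d.getD (PySem.Str.lower k) 0 + 1)) _
      (fun acc x _ => pvSetdefault_collapse acc (PySem.Str.lower x) 0 (· + 1))]
    rw [← List.foldl_map (f := PySem.Str.lower)
      (g := fun (d : PySem.Dict String Int) k => d.insert k (d.getD k 0 + 1))]
    exact PySem.Dict.foldl_insert_getD_add_one_eq_counter _
  · rw [PySem.List.foldl_add (g := fun (_ : String) => (1 : Int))]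
    simp

theorem pvIncAt_fold (label : Int) (doc : List String) :
    ∀ (t : List Int), doc.foldl (fun t _ => pvIncAt t label 1) t = pvIncAt t label (doc.length : Int) := by
  induction doc with
  | nil => intro t; simp [pvIncAt_zero]
  | cons w ws ih =>
    intro t
    simp only [List.foldl_cons, List.length_cons]
    rw [ih, pvIncAt_add]
    congr 1
    push_cast
    ring

-- proof-side names for the two per-document steps
def pvDocA (st : PySem.Dict String (List Int) × List Int) (label : Int) (doc : List String) :
    PySem.Dict String (List Int) × List Int :=
  ((process_data doc).1.keys.foldl (fun allst word =>
     (if allst.contains (PySem.Str.lower word) then allst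
      else allst.insert (PySem.Str.lower word) [0, 0]).insert (PySem.Str.lower word)
       (pvIncAt ((if allst.contains (PySem.Str.lower word) then allst
                  else allst.insert (PySem.Str.lower word) [0, 0]).getD (PySem.Str.lower word) [0, 0])
         label ((process_data doc).1.getD (PySem.Str.lower word) 0))) st.1,
   pvIncAt st.2 label (process_data doc).2)

def pvDocB (st : PySem.Dict String (List Int) × List Int) (label : Int) (doc : List String) :
    PySem.Dict String (List Int) × List Int :=
  doc.foldl (fun st word =>
    ((if st.1.contains (PySem.Str.lower word) then st.1
      else st.1.insert (PySem.Str.lower word) [0, 0]).insert (PySem.Str.lower word)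
       (pvIncAt ((if st.1.contains (PySem.Str.lower word) then st.1
                  else st.1.insert (PySem.Str.lower word) [0, 0]).getD (PySem.Str.lower word) [0, 0])
         label 1),
     pvIncAt st.2 label 1)) st

theorem pvDocB_eq (st : PySem.Dict String (List Int) × List Int) (label : Int) (doc : List String) :
    pvDocB st label doc =
      ((doc.map PySem.Str.lower).foldl (fun d k => d.insert k (pvIncAt (d.getD k [0, 0]) label 1)) st.1,
       pvIncAt st.2 label (doc.length : Int)) := by
  unfold pvDocB
  rw [show st = (st.1, st.2) from rfl]
  rw [PySem.List.foldl_prod_mk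
    (f := fun (d : PySem.Dict String (List Int)) word =>
      (if d.contains (PySem.Str.lower word) then d
       else d.insert (PySem.Str.lower word) [0, 0]).insert (PySem.Str.lower word)
        (pvIncAt ((if d.contains (PySem.Str.lower word) then d
                   else d.insert (PySem.Str.lower word) [0, 0]).getD (PySem.Str.lower word) [0, 0])
          label 1))
    (g := fun (t : List Int) (_ : String) => pvIncAt t label 1)]
  simp only [Prod.mk.injEq]
  constructor
  · rw [PySem.List.foldl_congr_mem _ _
      (fun (d : PySem.Dict String (List Int)) k =>
        d.insert (PySem.Str.lower k) (pvIncAt (d.getD (PySem.Str.lower k) [0, 0]) label 1)) _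
      (fun acc x _ => pvSetdefault_collapse acc (PySem.Str.lower x) [0, 0]
        (fun v => pvIncAt v label 1))]
    rw [← List.foldl_map (f := PySem.Str.lower)
      (g := fun (d : PySem.Dict String (List Int)) k => d.insert k (pvIncAt (d.getD k [0, 0]) label 1))]
  · exact pvIncAt_fold label doc st.2

theorem pvDoc_eq (st : PySem.Dict String (List Int) × List Int) (label : Int) (doc : List String)
    (hnd : st.1.keys.Nodup) : pvDocA st label doc = pvDocB st label doc := by
  rw [pvDocB_eq]
  unfold pvDocA
  rw [process_data_eq]
  simp only [PySem.Dict.keys_counter, Prod.mk.injEq]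
  constructor
  · rw [PySem.List.foldl_congr_mem _ _
      (fun (d : PySem.Dict String (List Int)) k =>
        d.insert k (pvIncAt (d.getD k [0, 0]) label (((doc.map PySem.Str.lower).count k : Nat) : Int))) _
      (by
        intro acc k hk
        have hkw : k ∈ doc.map PySem.Str.lower := (PySem.Set.mem_ofList _ k).mp hk
        obtain ⟨w, _, rfl⟩ := List.mem_map.mp hkw
        rw [strLower_idem]
        rw [pvSetdefault_collapse acc (PySem.Str.lower w) [0, 0]
          (fun v => pvIncAt v label ((PySem.Dict.counter (doc.map PySem.Str.lower)).getD (PySem.Str.lower w) 0))]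
        rw [PySem.Dict.getD_counter])]
    exact doc_dict label (doc.map PySem.Str.lower) st.1 hnd
  · trivial

theorem pvDocB_nodup (st : PySem.Dict String (List Int) × List Int) (label : Int)
    (doc : List String) (hnd : st.1.keys.Nodup) : (pvDocB st label doc).1.keys.Nodup := by
  rw [pvDocB_eq]
  exact PySem.Dict.nodup_keys_foldl_insert _ _ _ hnd

theorem outer_fold (tl : List Int) :
    ∀ (td : List (List String)) (st : PySem.Dict String (List Int) × List Int),
      tl.length ≤ td.length → st.1.keys.Nodup →
      (List.range tl.length).foldl (fun st i => pvDocA st (tl.getD i 0) (td.getD i [])) st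
      = (tl.zip td).foldl (fun st p => pvDocB st p.1 p.2) st := by
  induction tl with
  | nil => intro td st _ _; simp
  | cons l t ih =>
    intro td st hlen hnd
    match td with
    | [] => simp at hlen
    | doc :: td' =>
      simp only [List.length_cons, List.range_succ_eq_map, List.foldl_cons, List.foldl_map,
        List.zip_cons_cons]
      simp only [List.getD_cons_zero, List.getD_cons_succ]
      rw [pvDoc_eq _ _ _ hnd]
      exact ih td' (pvDocB st l doc) (by simpa using hlen) (pvDocB_nodup _ _ _ hnd)

theorem process_all_eq_fold (tl : List Int) (td : List (List String)) :
    process_all tl td =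
      (((List.range tl.length).foldl (fun st i => pvDocA st (tl.getD i 0) (td.getD i []))
        (PySem.Dict.empty, [0, 0])).1.items,
       ((List.range tl.length).foldl (fun st i => pvDocA st (tl.getD i 0) (td.getD i []))
        (PySem.Dict.empty, [0, 0])).2) := by
  unfold process_all pvDocA
  simp only [PySem.List.pyRange_zero_natCast, List.foldl_map, PySem.List.pyGetD_natCast]

theorem process_all_alt_eq_fold (tl : List Int) (td : List (List String)) :
    process_all_alt tl td =
      (((tl.zip td).foldl (fun st p => pvDocB st p.1 p.2) (PySem.Dict.empty, [0, 0])).1.items,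
       ((tl.zip td).foldl (fun st p => pvDocB st p.1 p.2) (PySem.Dict.empty, [0, 0])).2) := by
  rfl

-- ===== VERDICT (by name: the statement is the Claim_ definition above) =====
theorem process_all_spec : Claim_equal_process_all := by
  intro tl td _ hpre
  unfold Spec_process_all
  rw [process_all_eq_fold, process_all_alt_eq_fold,
    outer_fold tl td _ hpre.1 (by simp)]
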